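-- pv_equiv track=rewrite | github.com/ZeeshanAfzal51/plshelp | app.py | extract_parameters_from_response
-- ===== SOURCE A (Python) =====
-- def extract_parameters_from_response(response_text):
--     def sanitize_value(value):
--         return value.strip().replace('"', '').replace(',', '')
--
--     parameters = {
--         "PO Number": "NA",
--         "Invoice Number": "NA",
--         "Invoice Amount": "NA",
--         "Invoice Date": "NA",
--         "CGST Amount": "NA",
--         "SGST Amount": "NA",
--         "IGST Amount": "NA",
--         "Total Tax Amount": "NA",
--         "Taxable Amount": "NA",
--         "TCS Amount": "NA",
--         "IRN Number": "NA",
--         "Receiver GSTIN": "NA",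
--         "Receiver Name": "NA",
--         "Vendor GSTIN": "NA",
--         "Vendor Name": "NA",
--         "Remarks": "NA",
--         "Vendor Code": "NA"
--     }
--     lines = response_text.splitlines()
--     for line in lines:
--         for key in parameters.keys():
--             if key in line:
--                 value = sanitize_value(line.split(":")[-1].strip())
--                 parameters[key] = value
--     return parameters
-- ===== SOURCE B (Python) =====
-- def extract_parameters_from_response(response_text):
--     def sanitize_value(value):
--         return value.strip().replace('"', '').replace(',', '')
--
--     keys = [
--         "PO Number", "Invoice Number", "Invoice Amount", "Invoice Date",
--         "CGST Amount", "SGST Amount", "IGST Amount", "Total Tax Amount",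
--         "Taxable Amount", "TCS Amount", "IRN Number", "Receiver GSTIN",
--         "Receiver Name", "Vendor GSTIN", "Vendor Name", "Remarks", "Vendor Code",
--     ]
--     lines = response_text.splitlines()
--     result = {}
--     for key in keys:
--         value = "NA"
--         for line in reversed(lines):
--             if key in line:
--                 value = sanitize_value(line.split(":")[-1].strip())
--                 break
--         result[key] = value
--     return result
-- ===== Notes on version B (the rewrite author's own statement) =====
-- stated objective: alternative
-- what changed: Replaces A's single forward pass over the lines that overwrites a 17-key dict with a key-centric build: for each key a reverse search over the lines with early stop (last matching line wins by construction), assembling the result dict key by key.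
import Mathlib
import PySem

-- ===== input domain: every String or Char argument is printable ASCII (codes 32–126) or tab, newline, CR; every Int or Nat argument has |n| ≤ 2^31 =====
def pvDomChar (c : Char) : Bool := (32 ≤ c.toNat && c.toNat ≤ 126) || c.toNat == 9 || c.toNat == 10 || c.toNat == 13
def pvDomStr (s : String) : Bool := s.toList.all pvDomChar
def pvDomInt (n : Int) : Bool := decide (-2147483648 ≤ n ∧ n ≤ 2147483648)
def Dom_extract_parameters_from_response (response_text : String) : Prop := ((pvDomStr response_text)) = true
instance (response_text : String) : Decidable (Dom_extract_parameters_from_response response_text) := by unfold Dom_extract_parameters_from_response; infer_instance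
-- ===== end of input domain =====

-- B rebuilds the result key-centrically: for each of the 17 keys a reverse search over the lines
-- with early stop replaces A's forward overwrite pass over a dict (objective: alternative).


-- ===== PORT A =====
-- nested helper sanitize_value of A
def pvSanitizeA (value : String) : String :=
  PySem.Str.replace (PySem.Str.replace (PySem.Str.strip value) "\"" "") "," ""

def extract_parameters_from_response (response_text : String) : List (String × String) :=
  let parameters : PySem.Dict String String := PySem.Dict.ofList
    [("PO Number", "NA"), ("Invoice Number", "NA"), ("Invoice Amount", "NA"),
     ("Invoice Date", "NA"), ("CGST Amount", "NA"), ("SGST Amount", "NA"),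
     ("IGST Amount", "NA"), ("Total Tax Amount", "NA"), ("Taxable Amount", "NA"),
     ("TCS Amount", "NA"), ("IRN Number", "NA"), ("Receiver GSTIN", "NA"),
     ("Receiver Name", "NA"), ("Vendor GSTIN", "NA"), ("Vendor Name", "NA"),
     ("Remarks", "NA"), ("Vendor Code", "NA")]
  let lines := PySem.Str.splitlines response_text
  -- 'for key in parameters.keys()' iterates the dict's keys (they are never added/removed)
  (lines.foldl (fun params line =>
      params.keys.foldl (fun p key =>
        if PySem.Str.isIn key line then
          p.insert key (pvSanitizeA (PySem.Str.strip
            ((((PySem.Str.split? line ":").getD []).getLast?).getD "")))  -- split(":") is never empty, so [-1] is getLast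
        else p) params) parameters).items

-- ===== PORT B =====
-- nested helper sanitize_value of B
def pvSanitizeB (value : String) : String :=
  PySem.Str.replace (PySem.Str.replace (PySem.Str.strip value) "\"" "") "," ""

def pvKeyList : List String :=
  ["PO Number", "Invoice Number", "Invoice Amount", "Invoice Date",
   "CGST Amount", "SGST Amount", "IGST Amount", "Total Tax Amount",
   "Taxable Amount", "TCS Amount", "IRN Number", "Receiver GSTIN",
   "Receiver Name", "Vendor GSTIN", "Vendor Name", "Remarks", "Vendor Code"]

-- the inner 'for line in reversed(lines): … break' loop of B, applied to the reversed line list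
def pvRevFind (ls : List String) (key : String) : Option String :=
  match ls with
  | [] => none
  | l :: rest => if PySem.Str.isIn key l then some l else pvRevFind rest key

def extract_parameters_from_response_alt (response_text : String) : List (String × String) :=
  let rlines := (PySem.Str.splitlines response_text).reverse
  pvKeyList.map (fun key =>
    (key, match pvRevFind rlines key with
          | some l => pvSanitizeB (PySem.Str.strip
              ((((PySem.Str.split? l ":").getD []).getLast?).getD ""))
          | none => "NA"))

-- ===== PRECONDITION & SPEC =====
def Spec_extract_parameters_from_response (response_text : String) (out : List (String × String)) : Prop := out = extract_parameters_from_response_alt response_text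
instance (response_text : String) (out : List (String × String)) : Decidable (Spec_extract_parameters_from_response response_text out) := by unfold Spec_extract_parameters_from_response; infer_instance

-- ===== CLAIM (what is proved, stated in full; the proofs are below) =====
def Claim_equal_extract_parameters_from_response : Prop := ∀ (response_text : String), Dom_extract_parameters_from_response response_text → Spec_extract_parameters_from_response response_text (extract_parameters_from_response response_text)

-- ===== LEMMAS AND PROOFS =====

-- value A extracts from a matching line (abbreviation for the proofs only)
def pvVal (line : String) : String :=
  pvSanitizeA (PySem.Str.strip ((((PySem.Str.split? line ":").getD []).getLast?).getD ""))

-- the inner per-line loop of A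
def pvStep (line : String) (d : PySem.Dict String String) : PySem.Dict String String :=
  d.keys.foldl (fun p key =>
    if PySem.Str.isIn key line then p.insert key (pvVal line) else p) d

lemma pvKeys_innerFold (line : String) :
    ∀ (ks : List String) (d : PySem.Dict String String), (∀ k ∈ ks, k ∈ d.keys) →
    (ks.foldl (fun p key =>
      if PySem.Str.isIn key line then p.insert key (pvVal line) else p) d).keys = d.keys := by
  intro ks
  induction ks with
  | nil => intro d _; rfl
  | cons key rest ih =>
    intro d h
    have hk : key ∈ d.keys := h key (by simp)
    have hstep : (if PySem.Str.isIn key line then d.insert key (pvVal line) else d).keys = d.keys := by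
      split
      · exact PySem.Dict.keys_insert_of_contains d _
          ((PySem.Dict.contains_iff_mem_keys _ _).mpr hk)
      · rfl
    simp only [List.foldl_cons]
    rw [ih _ (by intro k hkr; rw [hstep]; exact h k (List.mem_cons_of_mem _ hkr)), hstep]

lemma pvGet_innerFold (line : String) (k : String) :
    ∀ (ks : List String) (d : PySem.Dict String String),
    (ks.foldl (fun p key =>
      if PySem.Str.isIn key line then p.insert key (pvVal line) else p) d).get? k =
    if k ∈ ks ∧ PySem.Str.isIn k line then some (pvVal line) else d.get? k := by
  intro ks
  induction ks with
  | nil => intro d; simp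
  | cons key rest ih =>
    intro d
    simp only [List.foldl_cons]
    rw [ih]
    simp only [PySem.Str.isIn_eq, List.mem_cons]
    by_cases hm2 : PySem.Chars.isIn key.toList line.toList = true
    · simp only [hm2, if_true]
      rw [PySem.Dict.get?_insert]
      by_cases hk : k = key
      · subst hk
        simp [hm2]
      · simp [hk]
    · simp only [hm2, Bool.false_eq_true, if_false]
      by_cases hk : k = key
      · subst hk; simp [hm2]
      · simp [hk]

lemma pvStep_keys (line : String) (d : PySem.Dict String String) :
    (pvStep line d).keys = d.keys :=
  pvKeys_innerFold line d.keys d (fun _ h => h)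

lemma pvStep_get? (line : String) (d : PySem.Dict String String) (k : String) (hk : k ∈ d.keys) :
    (pvStep line d).get? k =
      if PySem.Str.isIn k line then some (pvVal line) else d.get? k := by
  rw [pvStep, pvGet_innerFold]
  by_cases hm : PySem.Chars.isIn k.toList line.toList = true <;> simp [hm, hk]

lemma pvRevFind_append (xs : List String) (l : String) (k : String) :
    pvRevFind (xs ++ [l]) k =
      match pvRevFind xs k with
      | some l' => some l'
      | none => if PySem.Str.isIn k l then some l else none := by
  induction xs with
  | nil => simp [pvRevFind]
  | cons x rest ih =>
    simp only [List.cons_append, pvRevFind]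
    by_cases hm : PySem.Chars.isIn k.toList x.toList = true <;> simp [hm, ih]

lemma pvGet_outerFold (k : String) :
    ∀ (lines : List String) (d : PySem.Dict String String), d.keys = pvKeyList → k ∈ pvKeyList →
    (lines.foldl (fun params line => pvStep line params) d).get? k =
      match pvRevFind lines.reverse k with
      | some l => some (pvVal l)
      | none => d.get? k := by
  intro lines
  induction lines with
  | nil => intro d _ _; simp [pvRevFind]
  | cons l ls ih =>
    intro d hkeys hk
    simp only [List.foldl_cons, List.reverse_cons]
    rw [ih (pvStep l d) (by rw [pvStep_keys, hkeys]) hk, pvRevFind_append]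
    cases h : pvRevFind ls.reverse k with
    | some l' => simp
    | none =>
      simp only
      rw [pvStep_get? l d k (by rw [hkeys]; exact hk)]
      by_cases hm : PySem.Chars.isIn k.toList l.toList = true <;> simp [hm]

lemma pvInit_get? (k : String) (hk : k ∈ pvKeyList) :
    (PySem.Dict.ofList
    [("PO Number", "NA"), ("Invoice Number", "NA"), ("Invoice Amount", "NA"),
     ("Invoice Date", "NA"), ("CGST Amount", "NA"), ("SGST Amount", "NA"),
     ("IGST Amount", "NA"), ("Total Tax Amount", "NA"), ("Taxable Amount", "NA"),
     ("TCS Amount", "NA"), ("IRN Number", "NA"), ("Receiver GSTIN", "NA"),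
     ("Receiver Name", "NA"), ("Vendor GSTIN", "NA"), ("Vendor Name", "NA"),
     ("Remarks", "NA"), ("Vendor Code", "NA")] : PySem.Dict String String).get? k
    = some "NA" := by
  fin_cases hk <;> rfl

lemma pvInit_keys :
    (PySem.Dict.ofList
    [("PO Number", "NA"), ("Invoice Number", "NA"), ("Invoice Amount", "NA"),
     ("Invoice Date", "NA"), ("CGST Amount", "NA"), ("SGST Amount", "NA"),
     ("IGST Amount", "NA"), ("Total Tax Amount", "NA"), ("Taxable Amount", "NA"),
     ("TCS Amount", "NA"), ("IRN Number", "NA"), ("Receiver GSTIN", "NA"),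
     ("Receiver Name", "NA"), ("Vendor GSTIN", "NA"), ("Vendor Name", "NA"),
     ("Remarks", "NA"), ("Vendor Code", "NA")] : PySem.Dict String String).keys
    = pvKeyList := by rfl

-- ===== VERDICT (by name: the statement is the Claim_ definition above) =====
theorem extract_parameters_from_response_spec : Claim_equal_extract_parameters_from_response := by
  intro response_text _
  unfold Spec_extract_parameters_from_response
  unfold extract_parameters_from_response extract_parameters_from_response_alt
  simp only
  set init : PySem.Dict String String := PySem.Dict.ofList
    [("PO Number", "NA"), ("Invoice Number", "NA"), ("Invoice Amount", "NA"),
     ("Invoice Date", "NA"), ("CGST Amount", "NA"), ("SGST Amount", "NA"),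
     ("IGST Amount", "NA"), ("Total Tax Amount", "NA"), ("Taxable Amount", "NA"),
     ("TCS Amount", "NA"), ("IRN Number", "NA"), ("Receiver GSTIN", "NA"),
     ("Receiver Name", "NA"), ("Vendor GSTIN", "NA"), ("Vendor Name", "NA"),
     ("Remarks", "NA"), ("Vendor Code", "NA")] with hinit
  set lines := PySem.Str.splitlines response_text with hlines
  have hfold : (lines.foldl (fun params line =>
      params.keys.foldl (fun p key =>
        if PySem.Str.isIn key line then
          p.insert key (pvSanitizeA (PySem.Str.strip
            ((((PySem.Str.split? line ":").getD []).getLast?).getD "")))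
        else p) params) init)
      = lines.foldl (fun params line => pvStep line params) init := rfl
  rw [hfold]
  set final := lines.foldl (fun params line => pvStep line params) init with hfinal
  have hkeysinv : ∀ (ls : List String) (d : PySem.Dict String String), d.keys = pvKeyList →
      (ls.foldl (fun params line => pvStep line params) d).keys = pvKeyList := by
    intro ls
    induction ls with
    | nil => intro d hd; exact hd
    | cons l' ls' ih' =>
      intro d hd
      simp only [List.foldl_cons]
      exact ih' _ (by rw [pvStep_keys]; exact hd)
  have hkeys : final.keys = pvKeyList := hkeysinv lines init (by rw [hinit]; exact pvInit_keys)
  have hnodup : final.keys.Nodup := by rw [hkeys]; decide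
  rw [PySem.Dict.items_eq_map_keys final hnodup "NA", hkeys]
  apply List.map_congr_left
  intro k hk
  have hget : final.get? k =
      match pvRevFind lines.reverse k with
      | some l => some (pvVal l)
      | none => init.get? k :=
    pvGet_outerFold k lines init (by rw [hinit]; exact pvInit_keys) hk
  have hinitget : init.get? k = some "NA" := by rw [hinit]; exact pvInit_get? k hk
  rw [PySem.Dict.getD_eq_get?_getD, hget]
  cases h : pvRevFind lines.reverse k with
  | some l => simp [pvVal, pvSanitizeA, pvSanitizeB]
  | none => simp [hinitget]
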